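-- pv_equiv track=rewrite | github.com/Nurali004/str_while_loop_homework | While03.py | count_punctuation
-- ===== SOURCE A (Python) =====
-- import string
--
-- def count_punctuation(s):
--     """
--     A variable of type str is given. Find how many punctuations it contains and return.
--     Args:
--         s: str
--     Returns:
--         int: return answer
--
--     """
--     i=0
--     count=0
--     while i<len(s):
--         if s[i] in string.punctuation:
--             count+=1
--
--         i+=1
--
--     return count
-- ===== SOURCE B (Python) =====
-- import string
--
--
-- def count_punctuation(s):
--     # One str.count scan per punctuation character, summed.
--     return sum(s.count(p) for p in string.punctuation)
-- ===== Notes on version B (the rewrite author's own statement) =====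
-- stated objective: simpler
-- what changed: Replaces the index-driven while loop with per-character membership test by a single expression that sums s.count(p) over the 32-character punctuation alphabet (repeated C-level scans instead of one interpreted pass).
import Mathlib
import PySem

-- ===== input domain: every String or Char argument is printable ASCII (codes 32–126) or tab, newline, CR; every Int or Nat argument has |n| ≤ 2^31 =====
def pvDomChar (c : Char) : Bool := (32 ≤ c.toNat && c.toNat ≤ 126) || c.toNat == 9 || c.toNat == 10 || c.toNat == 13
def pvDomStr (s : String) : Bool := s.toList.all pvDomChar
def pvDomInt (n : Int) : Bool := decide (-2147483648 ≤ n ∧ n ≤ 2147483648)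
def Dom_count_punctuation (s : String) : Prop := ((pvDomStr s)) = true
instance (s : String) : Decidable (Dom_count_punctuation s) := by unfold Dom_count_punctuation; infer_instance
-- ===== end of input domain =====

-- B replaces A's index-driven while loop (membership test per character) by summing
-- s.count(p) over the punctuation alphabet; equal totals are proved for every string.

-- string.punctuation, as a list of characters
def pvPunct : List Char := "!\"#$%&'()*+,-./:;<=>?@[\\]^_`{|}~".toList

-- ===== PORT A =====
-- while i < len(s): if s[i] in string.punctuation: count += 1; i += 1
-- ('c in string.punctuation' for the single character s[i] is exactly membership of
-- that character among the punctuation characters; indices stay in range so s[i] is total here)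
def pvLoopA (s : List Char) (i : Nat) (count : Int) : Int :=
  if h : i < s.length then
    pvLoopA s (i + 1) (if s[i] ∈ pvPunct then count + 1 else count)
  else count
termination_by s.length - i

def count_punctuation (s : String) : Int := pvLoopA s.toList 0 0

-- ===== PORT B =====
-- sum(s.count(p) for p in string.punctuation)
def count_punctuation_alt (s : String) : Int :=
  (pvPunct.map (fun p => (PySem.Str.count s (String.ofList [p]) : Int))).sum

-- ===== PRECONDITION & SPEC =====
def Spec_count_punctuation (s : String) (out : Int) : Prop := out = count_punctuation_alt s
instance (s : String) (out : Int) : Decidable (Spec_count_punctuation s out) := by unfold Spec_count_punctuation; infer_instance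

-- ===== CLAIM (what is proved, stated in full; the proofs are below) =====
def Claim_equal_count_punctuation : Prop := ∀ (s : String), Dom_count_punctuation s → Spec_count_punctuation s (count_punctuation s)

-- ===== LEMMAS AND PROOFS =====

-- A's loop counts the punctuation characters of the suffix from index i
theorem pvLoopA_eq (s : List Char) (i : Nat) (count : Int) :
    pvLoopA s i count = count + ((s.drop i).countP (fun c => decide (c ∈ pvPunct)) : Int) := by
  by_cases h : i < s.length
  · rw [pvLoopA]
    simp only [h, dif_pos]
    rw [pvLoopA_eq s (i + 1)]
    have hd : s.drop i = s[i] :: s.drop (i + 1) := List.drop_eq_getElem_cons h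
    rw [hd, List.countP_cons]
    by_cases hm : s[i] ∈ pvPunct <;> simp [hm] <;> push_cast <;> ring
  · rw [pvLoopA]
    simp only [h, dif_neg, not_false_iff]
    rw [List.drop_eq_nil_of_le (by omega)]
    simp
termination_by s.length - i

-- Chars.count.go with a single-character needle counts occurrences of that character
theorem pvGo_single (c : Char) (fuel : Nat) :
    ∀ (l : List Char) (acc : Nat), l.length ≤ fuel →
      PySem.Chars.count.go [c] fuel l acc = acc + l.count c := by
  induction fuel with
  | zero =>
    intro l acc hl
    have : l = [] := List.eq_nil_of_length_eq_zero (by omega)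
    subst this; simp [PySem.Chars.count.go]
  | succ n ih =>
    intro l acc hl
    cases l with
    | nil => simp [PySem.Chars.count.go]
    | cons h t =>
      rw [PySem.Chars.count.go]
      by_cases hc : c = h
      · subst hc
        have hp : [c].isPrefixOf (c :: t) = true := by simp [List.isPrefixOf]
        simp only [hp, if_pos]
        have hdrop : List.drop ([c]).length (c :: t) = t := rfl
        rw [hdrop, ih t (acc + 1) (by simp only [List.length_cons] at hl; omega)]
        simp
        omega
      · have hp : [c].isPrefixOf (h :: t) = false := by
          simp only [List.isPrefixOf, Bool.and_true, beq_eq_false_iff_ne, ne_eq]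
          exact hc
        simp only [hp, Bool.false_eq_true, if_false]
        rw [ih t acc (by simp only [List.length_cons] at hl; omega)]
        simp [List.count_cons]
        exact fun e => hc e.symm

theorem pvCount_single (l : List Char) (c : Char) :
    PySem.Chars.count l [c] = l.count c := by
  have := pvGo_single c l.length l 0 le_rfl
  simp [PySem.Chars.count, this]

-- summing the 0/1 indicator of c over a duplicate-free alphabet
theorem pvIndicator_sum (c : Char) (ps : List Char) (hnd : ps.Nodup) :
    (ps.map (fun p => if c = p then (1 : Int) else 0)).sum
      = if c ∈ ps then (1 : Int) else 0 := by
  induction ps with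
  | nil => simp
  | cons p t ih =>
    rcases List.nodup_cons.mp hnd with ⟨hp, ht⟩
    rw [List.map_cons, List.sum_cons, ih ht]
    by_cases hc : c = p
    · subst hc; simp [hp]
    · simp [hc]

-- summing per-character counts over a duplicate-free alphabet equals countP of membership
theorem pvSum_count (ps : List Char) (hnd : ps.Nodup) (l : List Char) :
    (ps.map (fun p => (l.count p : Int))).sum
      = (l.countP (fun c => decide (c ∈ ps)) : Int) := by
  induction l with
  | nil => simp
  | cons c t ih =>
    have hsplit : (ps.map (fun p => ((c :: t).count p : Int))).sum
        = (ps.map (fun p => (t.count p : Int))).sum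
          + (ps.map (fun p => if c = p then (1 : Int) else 0)).sum := by
      rw [← List.sum_map_add]
      apply congrArg List.sum
      apply List.map_congr_left
      intro p _
      by_cases h : c = p <;> simp [h]
    rw [hsplit, ih, pvIndicator_sum c ps hnd, List.countP_cons]
    by_cases hm : c ∈ ps <;> simp [hm] <;> push_cast <;> ring

theorem pvPunct_nodup : pvPunct.Nodup := by decide

-- ===== VERDICT (by name: the statement is the Claim_ definition above) =====
theorem count_punctuation_spec : Claim_equal_count_punctuation := by
  intro s _
  show count_punctuation s = count_punctuation_alt s
  unfold count_punctuation count_punctuation_alt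
  rw [pvLoopA_eq]
  simp only [PySem.Str.count_eq, String.toList_ofList, pvCount_single]
  rw [pvSum_count pvPunct pvPunct_nodup]
  simp
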